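-- pv_equiv track=rewrite | github.com/dqk0902/DSA_2025 | week3/listsplit.py | count
-- ===== SOURCE A (Python) =====
-- def count(t):
--     n = len(t)
--     smallest = t[0]
--     index_smallest = []
--
--     for i in range(n):
--         if t[i] < smallest:
--             smallest = t[i]
--
--     for i in range(n):
--         if t[i] == smallest:
--             index_smallest.append(i)
--
--     if len(index_smallest) <= 1:
--         return 0
--     else:
--         return index_smallest[-1] - index_smallest[0]
-- ===== SOURCE B (Python) =====
-- def count(t):
--     smallest = t[0]
--     first = 0
--     last = 0
--     for i, x in enumerate(t):
--         if x < smallest: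
--             smallest = x
--             first = i
--             last = i
--         elif x == smallest:
--             last = i
--     return last - first
-- ===== Notes on version B (the rewrite author's own statement) =====
-- stated objective: simpler
-- what changed: Replaces A's two index-passes plus a collected index list by one enumerate loop keeping three scalars (current minimum, its first and last index) and returning last-first directly.
import Mathlib
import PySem

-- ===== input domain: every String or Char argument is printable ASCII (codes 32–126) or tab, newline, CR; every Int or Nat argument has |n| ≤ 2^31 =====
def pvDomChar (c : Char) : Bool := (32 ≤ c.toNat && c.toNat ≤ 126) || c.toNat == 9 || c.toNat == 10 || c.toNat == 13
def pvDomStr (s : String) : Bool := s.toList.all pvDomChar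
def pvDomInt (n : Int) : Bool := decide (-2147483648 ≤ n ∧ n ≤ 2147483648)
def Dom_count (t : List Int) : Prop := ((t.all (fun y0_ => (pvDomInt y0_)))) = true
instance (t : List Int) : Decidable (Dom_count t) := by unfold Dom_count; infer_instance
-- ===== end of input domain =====

-- B replaces A's two index-loops plus a collected index list by one enumerate pass
-- keeping three scalars (minimum, its first and last index); objective: simpler (O(1) extra space).

-- ===== PORT A =====
def count (t : List Int) : Int :=
  let n : Int := (t.length : Int)
  let smallest := PySem.List.pyGetD t 0 0
  let smallest :=
    (PySem.List.pyRange 0 n 1).foldl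
      (fun s i => if PySem.List.pyGetD t i 0 < s then PySem.List.pyGetD t i 0 else s) smallest
  let idx :=
    (PySem.List.pyRange 0 n 1).foldl
      (fun acc i => if PySem.List.pyGetD t i 0 = smallest then acc ++ [i] else acc) ([] : List Int)
  if idx.length ≤ 1 then 0
  else PySem.List.pyGetD idx (-1) 0 - PySem.List.pyGetD idx 0 0

-- ===== PORT B =====
-- the loop body of Source B: state (smallest, first, last), item (i, x)
def bstep (st : Int × Int × Int) (p : Int × Int) : Int × Int × Int :=
  if p.2 < st.1 then (p.2, p.1, p.1)
  else if p.2 = st.1 then (st.1, st.2.1, p.1)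
  else st

def count_alt (t : List Int) : Int :=
  let st := (PySem.List.enumerate t 0).foldl bstep (PySem.List.pyGetD t 0 0, 0, 0)
  st.2.2 - st.2.1

-- ===== PRECONDITION & SPEC =====
-- Pre_ excludes only the empty list, on which the Python A raises IndexError reading the first element.
def Pre_count (t : List Int) : Prop := t ≠ []
instance (t : List Int) : Decidable (Pre_count t) := by unfold Pre_count; infer_instance
def pvWitness_count : List Int := [3, 1, 2, 1, 4]

def Spec_count (t : List Int) (out : Int) : Prop := out = count_alt t
instance (t : List Int) (out : Int) : Decidable (Spec_count t out) := by unfold Spec_count; infer_instance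

-- ===== CLAIM (what is proved, stated in full; the proofs are below) =====
def Claim_equal_count : Prop := ∀ (t : List Int), Dom_count t → Pre_count t → Spec_count t (count t)

-- ===== LEMMAS AND PROOFS =====

-- fold computing the running minimum (A's first loop, seen on the list itself)
def fmin (a : Int) (l : List Int) : Int := l.foldl (fun s v => if v < s then v else s) a

-- indices (as produced by enumerate) at which the value m occurs
def idxOf (t : List Int) (m : Int) : List Int :=
  ((PySem.List.enumerate t 0).filter (fun p => decide (p.2 = m))).map (·.1)

theorem fmin_cons (a w : Int) (l : List Int) :
    fmin a (w :: l) = fmin (if w < a then w else a) l := rfl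

theorem fmin_le (l : List Int) : ∀ (a : Int), fmin a l ≤ a := by
  induction l with
  | nil => intro a; simp [fmin]
  | cons v l ih =>
    intro a
    rw [fmin_cons]
    by_cases h : v < a
    · rw [if_pos h]; exact le_trans (ih v) h.le
    · rw [if_neg h]; exact ih a

theorem fmin_le_mem (l : List Int) : ∀ (a v : Int), v ∈ l → fmin a l ≤ v := by
  induction l with
  | nil => intro a v hv; simp at hv
  | cons w l ih =>
    intro a v hv
    rw [fmin_cons]
    rcases List.mem_cons.mp hv with h | h
    · subst h
      by_cases hw : v < a
      · rw [if_pos hw]; exact fmin_le l v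
      · rw [if_neg hw]; exact le_trans (fmin_le l a) (le_of_not_gt hw)
    · exact ih _ v h

theorem headD_concat (l : List Int) (a d : Int) (h : l ≠ []) :
    (l ++ [a]).headD d = l.headD d := by
  cases l with
  | nil => exact absurd rfl h
  | cons x xs => simp

theorem getLast_eq_getLastD (l : List Int) (h : l ≠ []) : l.getLast h = l.getLastD 0 := by
  rw [List.getLastD_eq_getLast?, List.getLast?_eq_some_getLast h]
  rfl

theorem getD_zero_eq_headD (l : List Int) : l.getD 0 0 = l.headD 0 := by
  cases l <;> rfl

theorem enumerate_singleton (y s : Int) : PySem.List.enumerate [y] s = [(s, y)] := by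
  rw [PySem.List.enumerate_cons, PySem.List.enumerate_nil]

-- main invariant: B's fold state is (min, first index of min, last index of min),
-- expressed through idxOf, which is also what A computes.
theorem main_inv (x : Int) (xs : List Int) :
    (PySem.List.enumerate (x :: xs) 0).foldl bstep (x, 0, 0)
      = (fmin x (x :: xs),
         (idxOf (x :: xs) (fmin x (x :: xs))).headD 0,
         (idxOf (x :: xs) (fmin x (x :: xs))).getLastD 0)
    ∧ idxOf (x :: xs) (fmin x (x :: xs)) ≠ [] := by
  induction xs using List.reverseRecOn with
  | nil =>
    have h0 : fmin x [x] = x := by simp [fmin]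
    have h1 : idxOf [x] x = [0] := by
      simp [idxOf, PySem.List.enumerate_cons, PySem.List.enumerate_nil]
    rw [h0, h1]
    constructor
    · simp [PySem.List.enumerate_cons, PySem.List.enumerate_nil, bstep]
    · simp
  | append_singleton ys y ih =>
    have hsplit : x :: (ys ++ [y]) = (x :: ys) ++ [y] := by simp
    rw [hsplit]
    have hmin' : fmin x ((x :: ys) ++ [y])
        = if y < fmin x (x :: ys) then y else fmin x (x :: ys) := by
      simp [fmin, List.foldl_append]
    have henum : PySem.List.enumerate ((x :: ys) ++ [y]) 0
        = PySem.List.enumerate (x :: ys) 0 ++ [(((0 : Int) + ((x :: ys).length : Int)), y)] := by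
      rw [PySem.List.enumerate_append, enumerate_singleton]
    have hidx : idxOf ((x :: ys) ++ [y]) (fmin x ((x :: ys) ++ [y]))
        = ((PySem.List.enumerate (x :: ys) 0).filter
            (fun p => decide (p.2 = fmin x ((x :: ys) ++ [y])))).map (·.1)
          ++ (if y = fmin x ((x :: ys) ++ [y])
              then [((0 : Int) + ((x :: ys).length : Int))] else []) := by
      rw [idxOf, henum, List.filter_append, List.map_append]
      congr 1
      by_cases hy : y = fmin x ((x :: ys) ++ [y])
      · rw [if_pos hy, List.filter_cons, List.filter_nil, if_pos (decide_eq_true hy)]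
        rfl
      · rw [if_neg hy, List.filter_cons, List.filter_nil,
            if_neg (fun hcon => hy (of_decide_eq_true hcon))]
        rfl
    by_cases h1 : y < fmin x (x :: ys)
    · -- new strict minimum: all previous entries are larger
      have hmin2 : fmin x ((x :: ys) ++ [y]) = y := by rw [hmin', if_pos h1]
      have hempty : (PySem.List.enumerate (x :: ys) 0).filter
          (fun p => decide (p.2 = y)) = [] := by
        rw [List.filter_eq_nil_iff]
        intro p hp
        have hmem : p.2 ∈ (x :: ys) := by
          rw [← PySem.List.map_snd_enumerate (x :: ys) 0]
          exact List.mem_map_of_mem hp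
        have hle := fmin_le_mem (x :: ys) x p.2 hmem
        simp only [decide_eq_true_eq]
        intro hpe
        rw [hpe] at hle
        exact absurd (lt_of_lt_of_le h1 hle) (lt_irrefl y)
      have hidx2 : idxOf ((x :: ys) ++ [y]) (fmin x ((x :: ys) ++ [y]))
          = [((0 : Int) + ((x :: ys).length : Int))] := by
        rw [hidx, hmin2, hempty]
        simp
      constructor
      · rw [henum, List.foldl_append, ih.1]
        simp only [List.foldl_cons, List.foldl_nil]
        rw [hidx2, hmin2]
        simp [bstep, h1]
      · rw [hidx2]; simp
    · -- old minimum survives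
      have hmin2 : fmin x ((x :: ys) ++ [y]) = fmin x (x :: ys) := by rw [hmin', if_neg h1]
      have hkeep : ((PySem.List.enumerate (x :: ys) 0).filter
          (fun p => decide (p.2 = fmin x ((x :: ys) ++ [y])))).map (·.1)
          = idxOf (x :: ys) (fmin x (x :: ys)) := by
        rw [hmin2, idxOf]
      by_cases h2 : y = fmin x (x :: ys)
      · -- another occurrence of the minimum: last index moves to the end
        have hidx2 : idxOf ((x :: ys) ++ [y]) (fmin x ((x :: ys) ++ [y]))
            = idxOf (x :: ys) (fmin x (x :: ys)) ++ [((0 : Int) + ((x :: ys).length : Int))] := by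
          rw [hidx, hkeep, hmin2, if_pos h2]
        constructor
        · rw [henum, List.foldl_append, ih.1]
          simp only [List.foldl_cons, List.foldl_nil]
          rw [hidx2, hmin2, headD_concat _ _ _ ih.2, List.getLastD_concat]
          simp [bstep, h2]
        · rw [hidx2]; simp
      · -- larger element: nothing changes
        have hidx2 : idxOf ((x :: ys) ++ [y]) (fmin x ((x :: ys) ++ [y]))
            = idxOf (x :: ys) (fmin x (x :: ys)) := by
          rw [hidx, hkeep, hmin2, if_neg h2]
          simp
        constructor
        · rw [henum, List.foldl_append, ih.1]
          simp only [List.foldl_cons, List.foldl_nil]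
          rw [hidx2, hmin2]
          simp [bstep, h1, h2]
        · rw [hidx2]; exact ih.2

-- A's second loop produces exactly idxOf
theorem a_idx_eq (t : List Int) (m : Int) :
    (PySem.List.pyRange 0 ((t.length : Int)) 1).foldl
      (fun acc i => if PySem.List.pyGetD t i 0 = m then acc ++ [i] else acc) ([] : List Int)
    = idxOf t m := by
  rw [PySem.List.foldl_append_ite_eq_filter (fun i => PySem.List.pyGetD t i 0 = m)]
  rw [idxOf, PySem.List.enumerate_eq_map_pyRange t 0, List.filter_map, List.map_map]
  simp [Function.comp_def]

-- ===== VERDICT (by name: the statement is the Claim_ definition above) =====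
theorem count_spec : Claim_equal_count := by
  intro t _hdom hpre
  unfold Spec_count
  cases t with
  | nil => exact absurd rfl hpre
  | cons x xs =>
    obtain ⟨hst, hne⟩ := main_inv x xs
    have hB : count_alt (x :: xs)
        = (idxOf (x :: xs) (fmin x (x :: xs))).getLastD 0
          - (idxOf (x :: xs) (fmin x (x :: xs))).headD 0 := by
      unfold count_alt
      rw [PySem.List.pyGetD_zero_cons, hst]
    have hA1 : (PySem.List.pyRange 0 (((x :: xs).length : Int)) 1).foldl
        (fun s i => if PySem.List.pyGetD (x :: xs) i 0 < s then PySem.List.pyGetD (x :: xs) i 0 else s)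
        x = fmin x (x :: xs) := by
      have := PySem.List.foldl_pyRange_pyGetD' (x :: xs) 0
        (fun s v => if v < s then v else s) x (a := 0) (le_refl 0)
      simpa [fmin] using this
    have hA : count (x :: xs)
        = if (idxOf (x :: xs) (fmin x (x :: xs))).length ≤ 1 then 0
          else PySem.List.pyGetD (idxOf (x :: xs) (fmin x (x :: xs))) (-1) 0
               - PySem.List.pyGetD (idxOf (x :: xs) (fmin x (x :: xs))) 0 0 := by
      simp only [count, PySem.List.pyGetD_zero_cons, hA1, a_idx_eq]
    rw [hA, hB]
    by_cases hlen : (idxOf (x :: xs) (fmin x (x :: xs))).length ≤ 1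
    · have hpos : 1 ≤ (idxOf (x :: xs) (fmin x (x :: xs))).length :=
        List.length_pos_of_ne_nil hne
      have h1 : (idxOf (x :: xs) (fmin x (x :: xs))).length = 1 := by omega
      obtain ⟨a, ha⟩ := List.length_eq_one_iff.mp h1
      rw [if_pos hlen, ha]
      simp
    · rw [if_neg hlen, PySem.List.pyGetD_neg_one _ 0 hne, PySem.List.pyGetD_zero,
          getLast_eq_getLastD _ hne, getD_zero_eq_headD]
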